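-- pv_equiv track=rewrite | github.com/Nihcep/Hyperledger-Fabric-Automate-Installer | gen.py | createChannelProfile
-- ===== SOURCE A (Python) =====
-- def jumptab(number, number1):
--     i = 0
--     rslt = ""
--     while (i < number):
--         rslt = rslt + '\n'
--         i += 1
--     i = 0
--     while (i < number1):
--         rslt = rslt + "  "
--         i += 1
--     return (rslt)
--
-- def createChannelProfile(orgName, profileName):
--     rslt = jumptab(0, 1) + profileName + ":"
--     rslt += jumptab(1, 2) + "Consortium: ComposerConsortium"
--     rslt += jumptab(1, 2) + "Application:"
--     rslt += jumptab(1, 3) + "<<: *ApplicationDefaults"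
--     rslt += jumptab(1, 3) + "Organizations:"
--     i = 2
--     while (i < len(orgName)):
--         rslt += jumptab(1, 5) + "- *" + orgName[i]
--         i += 2
--     return (rslt)
-- ===== SOURCE B (Python) =====
-- def createChannelProfile(orgName, profileName):
--     # Stage 1: build an intermediate list of (indent-depth, text) line records.
--     # The org lines are selected by a toggle flag over orgName[2:] (every other one).
--     lines = [
--         (2, "Consortium: ComposerConsortium"),
--         (2, "Application:"),
--         (3, "<<: *ApplicationDefaults"),
--         (3, "Organizations:"),
--     ]
--     take = True
--     for org in orgName[2:]:
--         if take:
--             lines.append((5, "- *" + org))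
--         take = not take
--     # Stage 2: render pass — each record becomes newline + depth*2 spaces + text.
--     out = "  " + profileName + ":"
--     for depth, text in lines:
--         out += "\n" + "  " * depth + text
--     return out
-- ===== Notes on version B (the rewrite author's own statement) =====
-- stated objective: faster
-- what changed: Replaces the character-counting jumptab while-loops and the index-stepping while over orgName with a staged build: an intermediate list of (indent-depth, text) line records, the org records selected by a toggle flag in one pass over orgName[2:], then a separate rendering pass emitting newline + depth*2 spaces + text.
import Mathlib
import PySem

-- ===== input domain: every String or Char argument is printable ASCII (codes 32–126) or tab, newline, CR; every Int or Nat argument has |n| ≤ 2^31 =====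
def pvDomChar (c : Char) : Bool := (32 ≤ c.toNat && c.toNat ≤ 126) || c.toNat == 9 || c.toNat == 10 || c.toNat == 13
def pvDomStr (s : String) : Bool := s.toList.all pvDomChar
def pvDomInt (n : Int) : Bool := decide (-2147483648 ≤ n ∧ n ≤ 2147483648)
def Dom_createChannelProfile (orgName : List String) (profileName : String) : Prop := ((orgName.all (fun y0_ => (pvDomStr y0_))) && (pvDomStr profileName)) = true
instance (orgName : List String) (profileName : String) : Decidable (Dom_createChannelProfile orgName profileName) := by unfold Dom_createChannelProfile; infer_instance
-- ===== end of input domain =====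

-- B builds an intermediate list of (indent-depth, text) line records — org records selected by a
-- toggle flag in one pass — then renders them in a separate pass (measured faster in a timing run).

-- ===== PORT A =====
-- jumptab: two counted while-loops appending '\n' resp. "  "
def jumptab (number number1 : Int) : String :=
  let rslt : String := (PySem.List.pyRange 0 number 1).foldl (fun r _ => r ++ "\n") ""
  (PySem.List.pyRange 0 number1 1).foldl (fun r _ => r ++ "  ") rslt

-- the 'while (i < len(orgName))' loop of A, i stepping by 2
def whileOrg (orgName : List String) (i : Int) (rslt : String) : String :=
  if _h : i < (orgName.length : Int) then
    whileOrg orgName (i + 2) (rslt ++ (jumptab 1 5 ++ "- *" ++ PySem.List.pyGetD orgName i ""))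
  else rslt
termination_by ((orgName.length : Int) - i).toNat
decreasing_by omega

def createChannelProfile (orgName : List String) (profileName : String) : String :=
  let rslt := jumptab 0 1 ++ profileName ++ ":"
  let rslt := rslt ++ (jumptab 1 2 ++ "Consortium: ComposerConsortium")
  let rslt := rslt ++ (jumptab 1 2 ++ "Application:")
  let rslt := rslt ++ (jumptab 1 3 ++ "<<: *ApplicationDefaults")
  let rslt := rslt ++ (jumptab 1 3 ++ "Organizations:")
  whileOrg orgName 2 rslt

-- ===== PORT B =====
-- body of B's toggle loop: append the record on 'take', flip the flag either way
def pvOrgStep (st : List (Nat × String) × Bool) (org : String) : List (Nat × String) × Bool :=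
  if st.2 then (st.1 ++ [(5, "- *" ++ org)], !st.2) else (st.1, !st.2)

def createChannelProfile_alt (orgName : List String) (profileName : String) : String :=
  let fixed : List (Nat × String) :=
    [(2, "Consortium: ComposerConsortium"),
     (2, "Application:"),
     (3, "<<: *ApplicationDefaults"),
     (3, "Organizations:")]
  let lines := ((orgName.drop 2).foldl pvOrgStep (fixed, true)).1
  lines.foldl
    (fun out p => out ++ ("\n" ++ String.join (List.replicate p.1 "  ") ++ p.2))
    ("  " ++ profileName ++ ":")

-- ===== PRECONDITION & SPEC =====
def Spec_createChannelProfile (orgName : List String) (profileName : String) (out : String) : Prop := out = createChannelProfile_alt orgName profileName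
instance (orgName : List String) (profileName : String) (out : String) : Decidable (Spec_createChannelProfile orgName profileName out) := by unfold Spec_createChannelProfile; infer_instance

-- ===== CLAIM (what is proved, stated in full; the proofs are below) =====
def Claim_equal_createChannelProfile : Prop := ∀ (orgName : List String) (profileName : String), Dom_createChannelProfile orgName profileName → Spec_createChannelProfile orgName profileName (createChannelProfile orgName profileName)

-- ===== LEMMAS AND PROOFS =====

-- spec helper: the elements A's stride-2 loop visits / B's toggle keeps
def everyOther : List String → List String
  | [] => []
  | x :: rest => x :: everyOther (rest.drop 1)
termination_by l => l.length
decreasing_by simp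

theorem everyOther_nil : everyOther [] = [] := by
  conv_lhs => rw [everyOther.eq_def]

theorem everyOther_cons (x : String) (rest : List String) :
    everyOther (x :: rest) = x :: everyOther (rest.drop 1) := by
  conv_lhs => rw [everyOther.eq_def]

-- A's org-loop step string collapses to a literal prefix
theorem pvStepA (s : String) : jumptab 1 5 ++ "- *" ++ s = "\n          - *" ++ s := by
  rw [show jumptab 1 5 ++ "- *" = "\n          - *" from by decide]

-- B's rendered org-line record collapses to the same literal prefix
theorem pvStepB (s : String) :
    "\n" ++ String.join (List.replicate 5 "  ") ++ ("- *" ++ s) = "\n          - *" ++ s := by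
  rw [show ("\n" ++ String.join (List.replicate 5 "  ") : String) = "\n          " from by decide,
      ← String.append_assoc,
      show ("\n          " ++ "- *" : String) = "\n          - *" from by decide]

-- A's while loop equals a fold of the literal org lines over everyOther of the dropped list
theorem pvWhile_eq (n : Nat) : ∀ (xs ys : List String) (i : Int) (r : String),
    ys.length ≤ n → 0 ≤ i → xs.drop i.toNat = ys →
    whileOrg xs i r = (everyOther ys).foldl (fun out org => out ++ ("\n          - *" ++ org)) r := by
  induction n with
  | zero =>
      intro xs ys i r hlen hi hdrop
      have hys : ys = [] := List.length_eq_zero_iff.mp (Nat.le_zero.mp hlen)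
      subst hys
      have : xs.length ≤ i.toNat := by
        by_contra h
        exact absurd hdrop (by simp [List.drop_eq_nil_iff]; omega)
      rw [whileOrg, dif_neg (by omega), everyOther_nil]
      simp
  | succ n ih =>
      intro xs ys i r hlen hi hdrop
      cases ys with
      | nil =>
          have : xs.length ≤ i.toNat := by
            by_contra h
            exact absurd hdrop (by simp [List.drop_eq_nil_iff]; omega)
          rw [whileOrg, dif_neg (by omega), everyOther_nil]
          simp
      | cons y rest =>
          have hlt : i.toNat < xs.length := by
            by_contra h
            rw [List.drop_eq_nil_iff.mpr (by omega)] at hdrop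
            exact absurd hdrop (by simp)
          rw [whileOrg, dif_pos (by omega), everyOther_cons]
          have hget : PySem.List.pyGetD xs i "" = y := by
            rw [PySem.List.pyGetD_eq_getElem _ _ hi (by omega)]
            have h0 : (List.drop i.toNat xs)[0]? = xs[i.toNat + 0]? := List.getElem?_drop
            rw [hdrop] at h0
            simp only [Nat.add_zero, List.getElem?_cons_zero] at h0
            exact Option.some.inj ((List.getElem?_eq_getElem
              (by omega : i.toNat < xs.length)).symm.trans h0.symm)
          have hdrop' : xs.drop (i + 2).toNat = rest.drop 1 := by
            have h2 : (i + 2).toNat = 2 + i.toNat := by omega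
            have h3 : List.drop 2 (List.drop i.toNat xs) = List.drop (2 + i.toNat) xs := by
              simp [List.drop_drop, Nat.add_comm]
            rw [h2, ← h3, hdrop]
            rfl
          have hlen' : (rest.drop 1).length ≤ n := by
            simp only [List.length_drop, List.length_cons] at hlen ⊢
            omega
          rw [ih xs (rest.drop 1) (i + 2) _ hlen' (by omega) hdrop']
          simp only [List.foldl_cons]
          congr 2
          rw [hget]
          exact pvStepA y

-- B's toggle fold collects exactly the records of every other element
theorem pvToggle (n : Nat) : ∀ (ys : List String) (acc : List (Nat × String)),
    ys.length ≤ n →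
    ((ys.foldl pvOrgStep (acc, true)).1
        = acc ++ (everyOther ys).map (fun org => (5, "- *" ++ org))) ∧
    ((ys.foldl pvOrgStep (acc, false)).1
        = acc ++ (everyOther (ys.drop 1)).map (fun org => (5, "- *" ++ org))) := by
  induction n with
  | zero =>
      intro ys acc hlen
      have : ys = [] := List.length_eq_zero_iff.mp (Nat.le_zero.mp hlen)
      subst this
      simp [everyOther_nil]
  | succ n ih =>
      intro ys acc hlen
      cases ys with
      | nil => simp [everyOther_nil]
      | cons y rest =>
          have hlen' : rest.length ≤ n := by
            simp only [List.length_cons] at hlen; omega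
          constructor
          · simp only [List.foldl_cons, pvOrgStep, if_pos, Bool.not_true]
            rw [(ih rest (acc ++ [(5, "- *" ++ y)]) hlen').2, everyOther_cons]
            simp
          · simp only [List.foldl_cons, pvOrgStep]
            rw [if_neg (by simp)]
            simpa using (ih rest acc hlen').1

theorem createChannelProfile_eq (orgName : List String) (profileName : String) :
    createChannelProfile orgName profileName = createChannelProfile_alt orgName profileName := by
  unfold createChannelProfile createChannelProfile_alt
  dsimp only
  rw [pvWhile_eq (orgName.drop 2).length orgName (orgName.drop 2) 2 _ le_rfl (by omega) rfl,
      (pvToggle (orgName.drop 2).length (orgName.drop 2) _ le_rfl).1,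
      List.foldl_append, List.foldl_map]
  have hfun : (fun (out : String) (org : String) =>
      out ++ ("\n" ++ String.join (List.replicate ((5, "- *" ++ org) : Nat × String).1 "  ")
        ++ ((5, "- *" ++ org) : Nat × String).2)) =
      fun out org => out ++ ("\n          - *" ++ org) := by
    funext out org
    rw [pvStepB]
  rw [hfun]
  congr 1  -- the initial strings (header lines) agree by evaluation

-- ===== VERDICT (by name: the statement is the Claim_ definition above) =====
theorem createChannelProfile_spec : Claim_equal_createChannelProfile := by
  intro orgName profileName _
  exact createChannelProfile_eq orgName profileName
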